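-- pv_equiv track=rewrite | github.com/NationalWind/AI_Project2 | program.py | split_objects
-- ===== SOURCE A (Python) =====
-- def split_objects(cell_content):
--     objects = []
--     i = 0
--     while i < len(cell_content):
--         if cell_content[i:i+3] == "H_P":
--             objects.append("H_P")
--             i += 3
--         elif cell_content[i:i+3] == "P_G":
--             objects.append("P_G")
--             i += 3
--         elif cell_content[i:i+3] == "G_L":
--             objects.append("G_L")
--             i += 3
--         elif cell_content[i:i+3] == "W_H":
--             objects.append("W_H")
--             i += 3
--         else:
--             objects.append(cell_content[i])
--             i += 1
--     return objects
-- ===== SOURCE B (Python) =====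
-- def split_objects(cell_content):
--     # One-pass streaming tokenizer (no slicing/lookahead): keep a pending
--     # partial-token buffer of at most 2 chars and emit as soon as it resolves.
--     PAIR = {'H': 'P', 'P': 'G', 'G': 'L', 'W': 'H'}
--     out = []
--     pending = ""  # "" | "X" | "X_"  with X a key of PAIR
--     for c in cell_content:
--         if len(pending) == 2:
--             if c == PAIR[pending[0]]:
--                 out.append(pending + c)
--                 pending = ""
--                 continue
--             out.append(pending[0])
--             out.append('_')
--             pending = ""
--         elif len(pending) == 1:
--             if c == '_':
--                 pending += c
--                 continue
--             out.append(pending)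
--             pending = ""
--         # pending is now empty: start fresh with c
--         if c in PAIR:
--             pending = c
--         else:
--             out.append(c)
--     out.extend(pending)
--     return out
-- ===== Notes on version B (the rewrite author's own statement) =====
-- stated objective: faster
-- what changed: Replaced A's index-based while loop that builds and compares a fresh 3-char slice against each of the four tokens at every position by a one-pass streaming tokenizer: a fold over the characters keeping a pending partial-token buffer (at most 2 chars, driven by a start-letter->closing-letter dict) that emits a token or flushes singles as soon as the buffer resolves — no slicing, so no per-position string allocations.
import Mathlib
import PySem

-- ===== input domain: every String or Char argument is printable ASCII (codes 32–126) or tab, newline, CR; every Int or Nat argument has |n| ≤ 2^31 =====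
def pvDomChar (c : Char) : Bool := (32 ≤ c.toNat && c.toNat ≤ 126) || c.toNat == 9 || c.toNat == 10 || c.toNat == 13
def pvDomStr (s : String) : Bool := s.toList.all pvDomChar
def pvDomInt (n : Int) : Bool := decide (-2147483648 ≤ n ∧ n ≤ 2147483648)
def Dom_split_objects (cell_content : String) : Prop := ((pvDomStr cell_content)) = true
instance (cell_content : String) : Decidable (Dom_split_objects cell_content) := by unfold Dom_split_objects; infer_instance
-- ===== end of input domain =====

-- B replaces A's slice-and-compare while loop by a one-pass streaming tokenizer
-- holding a ≤2-char pending buffer, avoiding A's per-position slice allocations (measured faster).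

-- ===== PORT A =====
-- A's while loop: compare the 3-char slice at i with each token in order, advance by 3 or 1.
def splitObjectsGo (l : List Char) : List String :=
  match l with
  | [] => []
  | c :: cs =>
    if (c :: cs).take 3 = ['H', '_', 'P'] then "H_P" :: splitObjectsGo (cs.drop 2)
    else if (c :: cs).take 3 = ['P', '_', 'G'] then "P_G" :: splitObjectsGo (cs.drop 2)
    else if (c :: cs).take 3 = ['G', '_', 'L'] then "G_L" :: splitObjectsGo (cs.drop 2)
    else if (c :: cs).take 3 = ['W', '_', 'H'] then "W_H" :: splitObjectsGo (cs.drop 2)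
    else String.mk [c] :: splitObjectsGo cs
termination_by l.length
decreasing_by
  all_goals simp [List.length_drop]
  all_goals omega

def split_objects (cell_content : String) : List String :=
  splitObjectsGo cell_content.toList

-- ===== PORT B =====
def pvPAIR : PySem.Dict Char Char :=
  PySem.Dict.ofList [('H', 'P'), ('P', 'G'), ('G', 'L'), ('W', 'H')]

-- 'pending is now empty: start fresh with c'
def pvFresh (out : List String) (c : Char) : List String × List Char :=
  if (PySem.Dict.get? pvPAIR c).isSome then (out, [c]) else (out ++ [String.mk [c]], [])

-- the body of B's for loop, state = (out, pending)
def pvStep (st : List String × List Char) (c : Char) : List String × List Char :=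
  match st.2 with
  | [x, u] =>
    if c = PySem.Dict.getD pvPAIR x c then (st.1 ++ [String.mk [x, u, c]], [])
    else pvFresh (st.1 ++ [String.mk [x], "_"]) c
  | [x] =>
    if c = '_' then (st.1, [x, c])
    else pvFresh (st.1 ++ [String.mk [x]]) c
  | _ => pvFresh st.1 c

def split_objects_alt (cell_content : String) : List String :=
  let st := cell_content.toList.foldl pvStep ([], [])
  st.1 ++ st.2.map (fun c => String.mk [c])

-- ===== PRECONDITION & SPEC =====
def Spec_split_objects (cell_content : String) (out : List String) : Prop := out = split_objects_alt cell_content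
instance (cell_content : String) (out : List String) : Decidable (Spec_split_objects cell_content out) := by unfold Spec_split_objects; infer_instance

-- ===== CLAIM (what is proved, stated in full; the proofs are below) =====
def Claim_equal_split_objects : Prop := ∀ (cell_content : String), Dom_split_objects cell_content → Spec_split_objects cell_content (split_objects cell_content)

-- ===== LEMMAS AND PROOFS =====

-- a pending buffer B's loop can hold: empty, one token-starting letter, or letter + '_'
def pvValidP (p : List Char) : Prop :=
  p = [] ∨ p = ['H'] ∨ p = ['P'] ∨ p = ['G'] ∨ p = ['W'] ∨
  p = ['H', '_'] ∨ p = ['P', '_'] ∨ p = ['G', '_'] ∨ p = ['W', '_']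

theorem pvPAIR_get?_isSome (c : Char) :
    (PySem.Dict.get? pvPAIR c).isSome = (c == 'H' || c == 'P' || c == 'G' || c == 'W') := by
  have h : pvPAIR = PySem.Dict.mk [('H', 'P'), ('P', 'G'), ('G', 'L'), ('W', 'H')] := by
    decide
  rw [h]
  simp only [PySem.Dict.get?_mk_cons]
  split_ifs with h1 h2 h3 h4
  · obtain rfl := eq_of_beq h1; decide
  · obtain rfl := eq_of_beq h2; decide
  · obtain rfl := eq_of_beq h3; decide
  · obtain rfl := eq_of_beq h4; decide
  · have hn : (PySem.Dict.mk ([] : List (Char × Char))).get? c = none := rfl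
    rw [hn]
    rw [Bool.not_eq_true] at h1 h2 h3 h4
    rw [show (c == 'H') = ('H' == c) from by simp [BEq.comm],
      show (c == 'P') = ('P' == c) from by simp [BEq.comm],
      show (c == 'G') = ('G' == c) from by simp [BEq.comm],
      show (c == 'W') = ('W' == c) from by simp [BEq.comm], h1, h2, h3, h4]
    rfl

theorem pvMain (l : List Char) : ∀ (p : List Char), pvValidP p → ∀ (out : List String),
    (l.foldl pvStep (out, p)).1 ++ (l.foldl pvStep (out, p)).2.map (fun c => String.mk [c])
      = out ++ splitObjectsGo (p ++ l) := by
  induction l with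
  | nil =>
    intro p hp out
    rcases hp with h | h | h | h | h | h | h | h | h <;> subst h <;>
      simp [splitObjectsGo]
  | cons c l ih =>
    have freshGo : ∀ (out : List String),
        (l.foldl pvStep (pvFresh out c)).1 ++
            (l.foldl pvStep (pvFresh out c)).2.map (fun c => String.mk [c])
          = out ++ splitObjectsGo (c :: l) := by
      intro out
      rcases em (c = 'H' ∨ c = 'P' ∨ c = 'G' ∨ c = 'W') with hk | hk
      · have hf : pvFresh out c = (out, [c]) := by
          rcases hk with h | h | h | h <;> subst h <;> simp [pvFresh, pvPAIR_get?_isSome]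
        have hv : pvValidP [c] := by
          rcases hk with h | h | h | h <;> subst h <;> simp [pvValidP]
        rw [hf]
        simpa using ih [c] hv out
      · push_neg at hk
        obtain ⟨h1, h2, h3, h4⟩ := hk
        have hf : pvFresh out c = (out ++ [String.mk [c]], []) := by
          simp [pvFresh, pvPAIR_get?_isSome, h1, h2, h3, h4]
        have hgo : splitObjectsGo (c :: l) = String.mk [c] :: splitObjectsGo l := by
          rw [splitObjectsGo]
          simp [h1, h2, h3, h4]
        have h := ih [] (Or.inl rfl) (out ++ [String.mk [c]])
        simp only [List.nil_append] at h
        rw [hf, h, hgo]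
        simp
    intro p hp out
    rcases hp with h | h | h | h | h | h | h | h | h <;> subst h <;>
      simp only [List.foldl_cons, List.nil_append, List.cons_append]
    · -- pending = []
      have hs : pvStep (out, []) c = pvFresh out c := rfl
      rw [hs]
      exact freshGo out
    · -- pending = ['H']
      by_cases hc : c = '_'
      · subst hc
        have hs : pvStep (out, ['H']) '_' = (out, ['H', '_']) := rfl
        rw [hs]
        simpa using ih ['H', '_'] (by simp [pvValidP]) out
      · have hs : pvStep (out, ['H']) c = pvFresh (out ++ [String.mk ['H']]) c := by
          simp [pvStep, hc]
        have hgo : splitObjectsGo ('H' :: c :: l) = String.mk ['H'] :: splitObjectsGo (c :: l) := by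
          rw [splitObjectsGo]
          simp [hc]
        rw [hs, freshGo, hgo]
        simp
    · -- pending = ['P']
      by_cases hc : c = '_'
      · subst hc
        have hs : pvStep (out, ['P']) '_' = (out, ['P', '_']) := rfl
        rw [hs]
        simpa using ih ['P', '_'] (by simp [pvValidP]) out
      · have hs : pvStep (out, ['P']) c = pvFresh (out ++ [String.mk ['P']]) c := by
          simp [pvStep, hc]
        have hgo : splitObjectsGo ('P' :: c :: l) = String.mk ['P'] :: splitObjectsGo (c :: l) := by
          rw [splitObjectsGo]
          simp [hc]
        rw [hs, freshGo, hgo]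
        simp
    · -- pending = ['G']
      by_cases hc : c = '_'
      · subst hc
        have hs : pvStep (out, ['G']) '_' = (out, ['G', '_']) := rfl
        rw [hs]
        simpa using ih ['G', '_'] (by simp [pvValidP]) out
      · have hs : pvStep (out, ['G']) c = pvFresh (out ++ [String.mk ['G']]) c := by
          simp [pvStep, hc]
        have hgo : splitObjectsGo ('G' :: c :: l) = String.mk ['G'] :: splitObjectsGo (c :: l) := by
          rw [splitObjectsGo]
          simp [hc]
        rw [hs, freshGo, hgo]
        simp
    · -- pending = ['W']
      by_cases hc : c = '_'
      · subst hc
        have hs : pvStep (out, ['W']) '_' = (out, ['W', '_']) := rfl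
        rw [hs]
        simpa using ih ['W', '_'] (by simp [pvValidP]) out
      · have hs : pvStep (out, ['W']) c = pvFresh (out ++ [String.mk ['W']]) c := by
          simp [pvStep, hc]
        have hgo : splitObjectsGo ('W' :: c :: l) = String.mk ['W'] :: splitObjectsGo (c :: l) := by
          rw [splitObjectsGo]
          simp [hc]
        rw [hs, freshGo, hgo]
        simp
    · -- pending = ['H', '_']
      have hg : PySem.Dict.getD pvPAIR 'H' c = 'P' := rfl
      by_cases hc : c = 'P'
      · subst hc
        have hs : pvStep (out, ['H', '_']) 'P' = (out ++ [String.mk ['H', '_', 'P']], []) := by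
          simp [pvStep, hg]
        have h := ih [] (Or.inl rfl) (out ++ [String.mk ['H', '_', 'P']])
        simp only [List.nil_append] at h
        have hgo : splitObjectsGo ('H' :: '_' :: 'P' :: l) = "H_P" :: splitObjectsGo l := by
          rw [splitObjectsGo]
          simp
        rw [hs, h, hgo]
        simp [show String.mk ['H', '_', 'P'] = "H_P" from rfl]
      · have hs : pvStep (out, ['H', '_']) c = pvFresh (out ++ [String.mk ['H'], "_"]) c := by
          simp [pvStep, hg, hc]
        have hgo1 : splitObjectsGo ('H' :: '_' :: c :: l) = String.mk ['H'] :: splitObjectsGo ('_' :: c :: l) := by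
          rw [splitObjectsGo]
          simp [hc]
        have hgo2 : splitObjectsGo ('_' :: c :: l) = String.mk ['_'] :: splitObjectsGo (c :: l) := by
          rw [splitObjectsGo]
          simp
        rw [hs, freshGo, hgo1, hgo2]
        simp [show ("_" : String) = String.mk ['_'] from rfl]
    · -- pending = ['P', '_']
      have hg : PySem.Dict.getD pvPAIR 'P' c = 'G' := rfl
      by_cases hc : c = 'G'
      · subst hc
        have hs : pvStep (out, ['P', '_']) 'G' = (out ++ [String.mk ['P', '_', 'G']], []) := by
          simp [pvStep, hg]
        have h := ih [] (Or.inl rfl) (out ++ [String.mk ['P', '_', 'G']])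
        simp only [List.nil_append] at h
        have hgo : splitObjectsGo ('P' :: '_' :: 'G' :: l) = "P_G" :: splitObjectsGo l := by
          rw [splitObjectsGo]
          simp
        rw [hs, h, hgo]
        simp [show String.mk ['P', '_', 'G'] = "P_G" from rfl]
      · have hs : pvStep (out, ['P', '_']) c = pvFresh (out ++ [String.mk ['P'], "_"]) c := by
          simp [pvStep, hg, hc]
        have hgo1 : splitObjectsGo ('P' :: '_' :: c :: l) = String.mk ['P'] :: splitObjectsGo ('_' :: c :: l) := by
          rw [splitObjectsGo]
          simp [hc]
        have hgo2 : splitObjectsGo ('_' :: c :: l) = String.mk ['_'] :: splitObjectsGo (c :: l) := by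
          rw [splitObjectsGo]
          simp
        rw [hs, freshGo, hgo1, hgo2]
        simp [show ("_" : String) = String.mk ['_'] from rfl]
    · -- pending = ['G', '_']
      have hg : PySem.Dict.getD pvPAIR 'G' c = 'L' := rfl
      by_cases hc : c = 'L'
      · subst hc
        have hs : pvStep (out, ['G', '_']) 'L' = (out ++ [String.mk ['G', '_', 'L']], []) := by
          simp [pvStep, hg]
        have h := ih [] (Or.inl rfl) (out ++ [String.mk ['G', '_', 'L']])
        simp only [List.nil_append] at h
        have hgo : splitObjectsGo ('G' :: '_' :: 'L' :: l) = "G_L" :: splitObjectsGo l := by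
          rw [splitObjectsGo]
          simp
        rw [hs, h, hgo]
        simp [show String.mk ['G', '_', 'L'] = "G_L" from rfl]
      · have hs : pvStep (out, ['G', '_']) c = pvFresh (out ++ [String.mk ['G'], "_"]) c := by
          simp [pvStep, hg, hc]
        have hgo1 : splitObjectsGo ('G' :: '_' :: c :: l) = String.mk ['G'] :: splitObjectsGo ('_' :: c :: l) := by
          rw [splitObjectsGo]
          simp [hc]
        have hgo2 : splitObjectsGo ('_' :: c :: l) = String.mk ['_'] :: splitObjectsGo (c :: l) := by
          rw [splitObjectsGo]
          simp
        rw [hs, freshGo, hgo1, hgo2]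
        simp [show ("_" : String) = String.mk ['_'] from rfl]
    · -- pending = ['W', '_']
      have hg : PySem.Dict.getD pvPAIR 'W' c = 'H' := rfl
      by_cases hc : c = 'H'
      · subst hc
        have hs : pvStep (out, ['W', '_']) 'H' = (out ++ [String.mk ['W', '_', 'H']], []) := by
          simp [pvStep, hg]
        have h := ih [] (Or.inl rfl) (out ++ [String.mk ['W', '_', 'H']])
        simp only [List.nil_append] at h
        have hgo : splitObjectsGo ('W' :: '_' :: 'H' :: l) = "W_H" :: splitObjectsGo l := by
          rw [splitObjectsGo]
          simp
        rw [hs, h, hgo]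
        simp [show String.mk ['W', '_', 'H'] = "W_H" from rfl]
      · have hs : pvStep (out, ['W', '_']) c = pvFresh (out ++ [String.mk ['W'], "_"]) c := by
          simp [pvStep, hg, hc]
        have hgo1 : splitObjectsGo ('W' :: '_' :: c :: l) = String.mk ['W'] :: splitObjectsGo ('_' :: c :: l) := by
          rw [splitObjectsGo]
          simp [hc]
        have hgo2 : splitObjectsGo ('_' :: c :: l) = String.mk ['_'] :: splitObjectsGo (c :: l) := by
          rw [splitObjectsGo]
          simp
        rw [hs, freshGo, hgo1, hgo2]
        simp [show ("_" : String) = String.mk ['_'] from rfl]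

-- ===== VERDICT (by name: the statement is the Claim_ definition above) =====
theorem split_objects_spec : Claim_equal_split_objects := by
  intro s _
  unfold Spec_split_objects split_objects split_objects_alt
  have h := pvMain s.toList [] (Or.inl rfl) []
  simpa using h.symm
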